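-- pv_equiv track=rewrite | github.com/Coopsims/Random-Projects | Code Breaking/password cracking.py | password_generator
-- ===== SOURCE A (Python) =====
-- def password_generator(start, end, length, charset):
--     """
--     Generate password combinations in a specific range.
--
--     Args:
--         start: Starting index
--         end: Ending index
--         length: Length of passwords to generate
--         charset: Character set to use
--
--     Yields:
--         Lists of characters representing password candidates
--     """
--     # Convert start index to a base-n number where n is len(charset)
--     base = len(charset)
--     current = start
--     while current < end:
--         # Convert current index to password
--         indices = []
--         temp = current
--         for _ in range(length):
--             indices.append(temp % base)
--             temp //= base
--         indices.reverse()
--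
--         # Pad with zeros if needed
--         while len(indices) < length:
--             indices.insert(0, 0)
--
--         # Convert indices to characters
--         yield [charset[i] for i in indices]
--         current += 1
-- ===== SOURCE B (Python) =====
-- def password_generator(start, end, length, charset):
--     """Odometer-based rewrite: keep a persistent little-endian digit vector and
--     increment it in place instead of re-deriving all digits of each index."""
--     base = len(charset)
--     if start >= end:
--         return
--     n = length if length > 0 else 0
--     # least-significant n base-`base` digits of start, little-endian
--     digits = []
--     t = start
--     for _ in range(n):
--         t, d = divmod(t, base)
--         digits.append(d)
--     for _ in range(end - start):
--         yield [charset[d] for d in reversed(digits)]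
--         # odometer increment with wrap-around at the top digit
--         for i in range(n):
--             digits[i] += 1
--             if digits[i] < base:
--                 break
--             digits[i] = 0
-- ===== Notes on version B (the rewrite author's own statement) =====
-- stated objective: alternative
-- what changed: Instead of re-deriving all `length` base-n digits of every index by repeated divmod, B computes the digit vector once for `start` and then advances it per password as an in-place odometer increment (carry leftward, wrap at the top digit), also skipping A's dead padding loop.
import Mathlib
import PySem

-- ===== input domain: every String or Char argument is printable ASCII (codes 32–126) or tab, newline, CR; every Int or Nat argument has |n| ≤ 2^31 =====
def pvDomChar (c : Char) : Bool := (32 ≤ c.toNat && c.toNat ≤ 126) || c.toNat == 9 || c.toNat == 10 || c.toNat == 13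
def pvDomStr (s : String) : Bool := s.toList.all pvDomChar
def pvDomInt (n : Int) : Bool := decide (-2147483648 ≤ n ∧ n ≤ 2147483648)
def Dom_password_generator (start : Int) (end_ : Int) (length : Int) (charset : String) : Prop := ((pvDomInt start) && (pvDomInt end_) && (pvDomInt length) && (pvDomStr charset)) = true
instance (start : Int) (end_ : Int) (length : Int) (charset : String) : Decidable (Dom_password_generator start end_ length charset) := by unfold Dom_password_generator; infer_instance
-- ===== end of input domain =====

-- B replaces A's per-index digit recomputation (length divisions per password) by one
-- persistent little-endian digit vector incremented as an odometer; return-value equivalence only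
-- (both Pythons are generators, compared as the list of yielded lists).

-- ===== PORT A =====
-- charset[i] as a 1-character string; the none (IndexError) case is excluded by Pre_.
def pwChar (charset : String) (i : Int) : String :=
  ((PySem.Str.pyGet? charset i).map (fun c => String.ofList [c])).getD ""

-- 'while len(indices) < length: indices.insert(0, 0)'
def pwPad (lenN : Nat) (ind : List Int) : List Int :=
  if ind.length < lenN then pwPad lenN ((0:Int) :: ind) else ind
termination_by lenN - ind.length
decreasing_by simp only [List.length_cons]; omega

-- the 'while current < end' loop, fuel = number of remaining iterations
def pwA_go (base : Int) (length : Int) (charset : String) : Nat → Int → List (List String)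
  | 0, _ => []
  | fuel + 1, current =>
    let p := (List.range length.toNat).foldl
      (fun (st : List Int × Int) _ =>
        (st.1 ++ [PySem.Int.mod st.2 base], PySem.Int.floordiv st.2 base))
      ([], current)
    let indices := pwPad length.toNat p.1.reverse
    (indices.map (pwChar charset)) :: pwA_go base length charset fuel (current + 1)

def password_generator (start : Int) (end_ : Int) (length : Int) (charset : String) : List (List String) :=
  let base : Int := PySem.Str.len charset
  pwA_go base length charset (end_ - start).toNat start

-- ===== PORT B =====
-- least-significant n digits of t, little-endian ('t, d = divmod(t, base); digits.append(d)')
def pwDigits (base : Int) : Nat → Int → List Int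
  | 0, _ => []
  | n + 1, t => PySem.Int.mod t base :: pwDigits base n (PySem.Int.floordiv t base)

-- odometer increment with carry, wrapping out of the top (last) digit
def pwInc (base : Int) : List Int → List Int
  | [] => []
  | d :: rest => if d + 1 < base then (d + 1) :: rest else 0 :: pwInc base rest

def pwB_go (base : Int) (charset : String) : Nat → List Int → List (List String)
  | 0, _ => []
  | fuel + 1, digits =>
    (digits.reverse.map (pwChar charset)) :: pwB_go base charset fuel (pwInc base digits)

def password_generator_alt (start : Int) (end_ : Int) (length : Int) (charset : String) : List (List String) :=
  let base : Int := PySem.Str.len charset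
  if end_ ≤ start then []
  else pwB_go base charset (end_ - start).toNat (pwDigits base length.toNat start)

-- ===== PRECONDITION & SPEC =====
-- Pre_ excludes only the inputs where A raises ZeroDivisionError: empty charset with
-- length > 0 and at least one index to generate ('temp % 0').
def Pre_password_generator (start : Int) (end_ : Int) (length : Int) (charset : String) : Prop :=
  charset = "" → (length ≤ 0 ∨ end_ ≤ start)
instance (start : Int) (end_ : Int) (length : Int) (charset : String) : Decidable (Pre_password_generator start end_ length charset) := by unfold Pre_password_generator; infer_instance

def pvWitness_password_generator : Int × Int × Int × String := (2, 7, 2, "ab")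

def Spec_password_generator (start : Int) (end_ : Int) (length : Int) (charset : String) (out : List (List String)) : Prop := out = password_generator_alt start end_ length charset
instance (start : Int) (end_ : Int) (length : Int) (charset : String) (out : List (List String)) : Decidable (Spec_password_generator start end_ length charset out) := by unfold Spec_password_generator; infer_instance

-- ===== CLAIM (what is proved, stated in full; the proofs are below) =====
def Claim_equal_password_generator : Prop := ∀ (start : Int) (end_ : Int) (length : Int) (charset : String), Dom_password_generator start end_ length charset → Pre_password_generator start end_ length charset → Spec_password_generator start end_ length charset (password_generator start end_ length charset)

-- ===== LEMMAS AND PROOFS =====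

-- iterated 'temp //= base'
def pwShift (base : Int) : Nat → Int → Int
  | 0, t => t
  | n + 1, t => pwShift base n (PySem.Int.floordiv t base)

theorem pwShift_succ (base : Int) (L : Nat) (t : Int) :
    pwShift base (L + 1) t = PySem.Int.floordiv (pwShift base L t) base := by
  induction L generalizing t with
  | zero => rfl
  | succ L ih => simpa [pwShift] using ih (PySem.Int.floordiv t base)

theorem pwDigits_succ (base : Int) (L : Nat) (t : Int) :
    pwDigits base (L + 1) t = pwDigits base L t ++ [PySem.Int.mod (pwShift base L t) base] := by
  induction L generalizing t with
  | zero => rfl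
  | succ L ih =>
    show PySem.Int.mod t base :: pwDigits base (L + 1) (PySem.Int.floordiv t base) = _
    rw [ih (PySem.Int.floordiv t base)]
    simp [pwDigits, pwShift]

theorem pwDigits_length (base : Int) (L : Nat) (t : Int) : (pwDigits base L t).length = L := by
  induction L generalizing t with
  | zero => rfl
  | succ L ih => simp [pwDigits, ih]

theorem pwA_fold (base : Int) (L : Nat) (acc : List Int) (t : Int) :
    (List.range L).foldl
      (fun (st : List Int × Int) _ =>
        (st.1 ++ [PySem.Int.mod st.2 base], PySem.Int.floordiv st.2 base))
      (acc, t)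
    = (acc ++ pwDigits base L t, pwShift base L t) := by
  induction L generalizing acc t with
  | zero => simp [pwDigits, pwShift]
  | succ L ih =>
    rw [List.range_succ, List.foldl_append, ih]
    simp [pwDigits_succ, pwShift_succ]

theorem pwPad_of_length (L : Nat) (ind : List Int) (h : ind.length = L) : pwPad L ind = ind := by
  rw [pwPad]; simp [h]

-- the odometer step advances the digit vector from index t to index t + 1
theorem pwInc_digits (base : Int) (L : Nat) (t : Int) (hb : 0 < base ∨ L = 0) :
    pwInc base (pwDigits base L t) = pwDigits base L (t + 1) := by
  rcases hb with hb | rfl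
  · induction L generalizing t with
    | zero => rfl
    | succ L ih =>
      have hbne : base ≠ 0 := by omega
      have hmod : PySem.Int.mod t base = t % base := PySem.Int.mod_eq_emod_of_pos hb
      have hdiv : PySem.Int.floordiv t base = t / base := PySem.Int.floordiv_eq_ediv_of_pos hb
      have hmod1 : PySem.Int.mod (t+1) base = (t+1) % base := PySem.Int.mod_eq_emod_of_pos hb
      have hdiv1 : PySem.Int.floordiv (t+1) base = (t+1) / base := PySem.Int.floordiv_eq_ediv_of_pos hb
      have hr0 : 0 ≤ t % base := Int.emod_nonneg t hbne
      have hrlt : t % base < base := Int.emod_lt_of_pos t hb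
      have ht : t = base * (t / base) + t % base := (Int.ediv_add_emod t base).symm
      have key : t + 1 = (t % base + 1) + base * (t / base) := by
        conv_lhs => rw [ht]
        ring
      show pwInc base (PySem.Int.mod t base :: pwDigits base L (PySem.Int.floordiv t base)) = _
      rw [pwInc, hmod, hdiv]
      by_cases h : t % base + 1 < base
      · rw [if_pos h]
        have e1 : (t + 1) % base = t % base + 1 := by
          rw [key, Int.add_mul_emod_self_left]
          exact Int.emod_eq_of_lt (by omega) h
        have e2 : (t + 1) / base = t / base := by
          rw [key, Int.add_mul_ediv_left _ _ hbne]
          rw [Int.ediv_eq_zero_of_lt (by omega) h]; ring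
        simp [pwDigits, hmod1, hdiv1, e1, e2]
      · rw [if_neg h]
        have hreq : t % base + 1 = base := by omega
        have ht1 : t + 1 = base * (t / base + 1) := by
          rw [key, mul_add, mul_one]; omega
        have e1 : (t + 1) % base = 0 := by rw [ht1, Int.mul_emod_right]
        have e2 : (t + 1) / base = t / base + 1 := by
          rw [ht1, Int.mul_ediv_cancel_left _ hbne]
        rw [ih (t / base)]
        simp [pwDigits, hmod1, hdiv1, e1, e2]
  · rfl

theorem pwGo_eq (base : Int) (length : Int) (charset : String)
    (hb : 0 < base ∨ length.toNat = 0) :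
    ∀ (fuel : Nat) (current : Int),
      pwA_go base length charset fuel current
        = pwB_go base charset fuel (pwDigits base length.toNat current) := by
  intro fuel
  induction fuel with
  | zero => intro current; rfl
  | succ fuel ih =>
    intro current
    rw [pwA_go, pwB_go, ih (current + 1), pwInc_digits base length.toNat current hb]
    rw [pwA_fold]
    rw [pwPad_of_length _ _ (by simp [pwDigits_length])]
    simp

-- ===== VERDICT (by name: the statement is the Claim_ definition above) =====
theorem password_generator_spec : Claim_equal_password_generator := by
  intro start end_ length charset _hdom hpre
  unfold Spec_password_generator password_generator password_generator_alt
  by_cases hle : end_ ≤ start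
  · have : (end_ - start).toNat = 0 := by omega
    simp [hle, this, pwA_go]
  · rw [if_neg hle]
    apply pwGo_eq
    by_cases hcs : charset = ""
    · rcases hpre hcs with h | h
      · right; omega
      · exact absurd h hle
    · left
      have hlen : charset.length ≠ 0 := by
        intro h
        exact hcs (by simpa [String.length_eq_zero_iff] using h)
      simp [PySem.Str.len]
      omega
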